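-- pv_equiv track=rewrite | github.com/ShaharNaveh/aoc | 2023/07/solve.py | get_hand_tiebreaker
-- ===== SOURCE A (Python) =====
-- CARD_VALUES = {
--   **{str(num): num for num in range(2, 10)},
--   **{c: num for num, c in enumerate("TJQKA")}
-- }
--
-- JOKER = "J"
--
-- JOKER_VALUE = 1
--
-- def get_hand_tiebreaker(hand: str, use_joker=False) -> int:
--     values = []
--     for card in hand:
--         if use_joker and card == JOKER:
--             values.append(JOKER_VALUE)
--         else:
--             values.append(CARD_VALUES[card])
--
--     tiebreaker = 0
--     for value in values:
--         tiebreaker = 100 * tiebreaker + value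
--     return tiebreaker
-- ===== SOURCE B (Python) =====
-- CARD_VALUES = {
--   **{str(num): num for num in range(2, 10)},
--   **{c: num for num, c in enumerate("TJQKA")}
-- }
--
-- JOKER = "J"
--
-- JOKER_VALUE = 1
--
-- def get_hand_tiebreaker(hand: str, use_joker=False) -> int:
--     values = [JOKER_VALUE if use_joker and card == JOKER else CARD_VALUES[card]
--               for card in hand]
--     n = len(values)
--     return sum(v * 100 ** (n - 1 - i) for i, v in enumerate(values))
-- ===== Notes on version B (the rewrite author's own statement) =====
-- stated objective: alternative
-- what changed: Replaces the append-loop that builds the value list with a single comprehension and replaces the Horner multiply-accumulate fold with an explicit positional place-value sum (val * 100**(n-1-i) over enumerate).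
import Mathlib
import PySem

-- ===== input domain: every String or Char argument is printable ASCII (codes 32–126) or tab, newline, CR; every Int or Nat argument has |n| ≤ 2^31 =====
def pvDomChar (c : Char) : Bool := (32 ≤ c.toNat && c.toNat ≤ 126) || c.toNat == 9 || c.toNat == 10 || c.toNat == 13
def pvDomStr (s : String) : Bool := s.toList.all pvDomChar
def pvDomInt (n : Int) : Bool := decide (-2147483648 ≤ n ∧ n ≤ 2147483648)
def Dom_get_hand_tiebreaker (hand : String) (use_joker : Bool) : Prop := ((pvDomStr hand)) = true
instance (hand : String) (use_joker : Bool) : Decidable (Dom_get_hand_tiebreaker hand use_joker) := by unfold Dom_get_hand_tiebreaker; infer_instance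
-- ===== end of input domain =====

-- B replaces A's append-loop + Horner fold by a comprehension and an explicit place-value sum (alternative decomposition, same cost).

-- ===== PORT A =====
-- CARD_VALUES = {**{str(num): num for num in range(2,10)}, **{c: num for num, c in enumerate("TJQKA")}}
def CARD_VALUES : PySem.Dict String Int :=
  (PySem.List.enumerate "TJQKA".toList 0).foldl
    (fun d p => d.insert (String.ofList [p.2]) p.1)
    ((PySem.List.pyRange 2 10 1).foldl (fun d n => d.insert (PySem.Int.toStr n) n) (PySem.Dict.mk []))

def get_hand_tiebreaker (hand : String) (use_joker : Bool) : Int :=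
  -- values built by the append loop; CARD_VALUES[card] via getD (KeyError excluded by Pre_)
  let values := hand.toList.foldl
    (fun vs c => vs ++ [if use_joker && (c == 'J') then (1 : Int)
                        else CARD_VALUES.getD (String.ofList [c]) 0]) []
  values.foldl (fun t v => 100 * t + v) 0

-- ===== PORT B =====
def get_hand_tiebreaker_alt (hand : String) (use_joker : Bool) : Int :=
  let values := hand.toList.map
    (fun c => if use_joker && (c == 'J') then (1 : Int)
              else CARD_VALUES.getD (String.ofList [c]) 0)
  let n : Int := values.length
  ((PySem.List.enumerate values 0).map (fun p => p.2 * (100 : Int) ^ (n - 1 - p.1).toNat)).sum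

-- ===== PRECONDITION & SPEC =====
-- Pre_ excludes exactly the hands containing a character that is not a card key (there A raises KeyError).
def Pre_get_hand_tiebreaker (hand : String) (use_joker : Bool) : Prop :=
  (hand.toList.all (fun c => "23456789TJQKA".toList.contains c)) = true
instance (hand : String) (use_joker : Bool) : Decidable (Pre_get_hand_tiebreaker hand use_joker) := by
  unfold Pre_get_hand_tiebreaker; infer_instance
def pvWitness_get_hand_tiebreaker : String × Bool := ("KQJT9", true)

def Spec_get_hand_tiebreaker (hand : String) (use_joker : Bool) (out : Int) : Prop := out = get_hand_tiebreaker_alt hand use_joker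
instance (hand : String) (use_joker : Bool) (out : Int) : Decidable (Spec_get_hand_tiebreaker hand use_joker out) := by unfold Spec_get_hand_tiebreaker; infer_instance

-- ===== CLAIM (what is proved, stated in full; the proofs are below) =====
def Claim_equal_get_hand_tiebreaker : Prop := ∀ (hand : String) (use_joker : Bool), Dom_get_hand_tiebreaker hand use_joker → Pre_get_hand_tiebreaker hand use_joker → Spec_get_hand_tiebreaker hand use_joker (get_hand_tiebreaker hand use_joker)

-- ===== LEMMAS AND PROOFS =====

-- A's append loop builds exactly the mapped list.
theorem foldl_append_map {α β : Type} (f : α → β) (l : List α) (acc : List β) :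
    l.foldl (fun vs c => vs ++ [f c]) acc = acc ++ l.map f := by
  induction l generalizing acc with
  | nil => simp
  | cons x t ih => simp [List.foldl, ih]

-- Horner evaluation equals the positional place-value sum.
theorem horner_eq_place_value (l : List Int) (k acc n : Int)
    (hk : 0 ≤ k) (hn : k + l.length = n) :
    l.foldl (fun t v => 100 * t + v) acc
      = acc * 100 ^ l.length +
        ((PySem.List.enumerate l k).map (fun p => p.2 * (100 : Int) ^ (n - 1 - p.1).toNat)).sum := by
  induction l generalizing acc k with
  | nil => simp [PySem.List.enumerate_nil]
  | cons v t ih =>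
    have hk1 : (0:Int) ≤ k + 1 := by omega
    have hn1 : (k + 1) + (t.length : Int) = n := by
      simp at hn; push_cast at hn ⊢; omega
    have hexp : ((n - 1 - k).toNat) = t.length := by
      simp at hn; omega
    rw [PySem.List.enumerate_cons]
    simp only [List.foldl, List.map, List.sum_cons]
    rw [ih (k + 1) (100 * acc + v) hk1 hn1, hexp]
    simp only [List.length_cons, pow_succ]
    ring

-- instantiation of the Horner lemma at start index 0, acc 0, n = length
theorem horner_final (values : List Int) :
    values.foldl (fun t v => 100 * t + v) 0
      = ((PySem.List.enumerate values 0).map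
          (fun p => p.2 * (100 : Int) ^ (((values.length : Int)) - 1 - p.1).toNat)).sum := by
  rw [horner_eq_place_value values 0 0 (values.length : Int) le_rfl (by simp)]
  simp

-- ===== VERDICT (by name: the statement is the Claim_ definition above) =====
theorem get_hand_tiebreaker_spec : Claim_equal_get_hand_tiebreaker := by
  intro hand use_joker _ _
  show get_hand_tiebreaker hand use_joker = get_hand_tiebreaker_alt hand use_joker
  unfold get_hand_tiebreaker get_hand_tiebreaker_alt
  rw [foldl_append_map, List.nil_append]
  exact horner_final _
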